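-- pv_equiv track=rewrite | github.com/JohnnyVip/PythonTest | wangmin/deleteZero.py | deleteZero
-- ===== SOURCE A (Python) =====
-- def deleteZero(num:str=None):
--     '''
--     0.81568000
--     若一个8位小数的最低3位是0，则将其删除，低4位小数无论是否为0,均保留!
--     :param num:
--     :return:
--     '''
--     length = len(num)
--
--     reverse_num = num[::-1]
--
--     cnt = 0
--
--     for ch in reverse_num:
--         if ch == '0':
--             cnt += 1
--             if cnt == 3:
--                 break
--         else:
--             break
--
--     num = num[0:length-cnt]
--
--     return num
-- ===== SOURCE B (Python) =====
-- def deleteZero(num: str = None):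
--     if num.endswith('000'):
--         return num[:-3]
--     if num.endswith('00'):
--         return num[:-2]
--     if num.endswith('0'):
--         return num[:-1]
--     return num
-- ===== Notes on version B (the rewrite author's own statement) =====
-- stated objective: simpler
-- what changed: Replaces A's reverse-the-string counting loop with a loop-free early-return chain of three suffix tests ('000', '00', '0') each slicing off the matched suffix; no counter, no reversal, no slice arithmetic.
import Mathlib
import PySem

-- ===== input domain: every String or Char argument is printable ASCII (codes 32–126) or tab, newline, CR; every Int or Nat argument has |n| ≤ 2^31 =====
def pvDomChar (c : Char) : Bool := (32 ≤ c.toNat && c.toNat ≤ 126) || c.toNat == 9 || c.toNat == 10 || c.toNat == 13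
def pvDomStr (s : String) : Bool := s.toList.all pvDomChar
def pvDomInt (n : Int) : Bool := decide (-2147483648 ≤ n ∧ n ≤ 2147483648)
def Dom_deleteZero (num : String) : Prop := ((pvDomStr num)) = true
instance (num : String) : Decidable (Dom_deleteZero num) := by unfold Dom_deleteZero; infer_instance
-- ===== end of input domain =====

-- B replaces A's reversed-string counting loop by a loop-free early-return chain of
-- three suffix tests ('000', '00', '0'), each slicing off what it matched; objective: simpler.

-- ===== PORT A =====
-- A's for-loop over the reversed characters, with its two `break`s: stop at cnt == 3
-- or at the first non-'0' character.
def deleteZeroLoop : List Char → Nat → Nat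
  | [], cnt => cnt
  | ch :: rest, cnt =>
      if ch == '0' then
        let cnt' := cnt + 1
        if cnt' == 3 then cnt' else deleteZeroLoop rest cnt'
      else cnt

def deleteZero (num : String) : String :=
  let length := num.toList.length                 -- len(num)
  let reverse_num := num.toList.reverse           -- num[::-1]
  let cnt := deleteZeroLoop reverse_num 0
  -- num[0:length-cnt]
  String.ofList (PySem.List.slice num.toList (some 0) (some ((length : Int) - (cnt : Int))))

-- ===== PORT B =====
def deleteZero_alt (num : String) : String :=
  if PySem.Str.endswith num "000" then
    String.ofList (PySem.List.slice num.toList none (some (-3)))   -- num[:-3]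
  else if PySem.Str.endswith num "00" then
    String.ofList (PySem.List.slice num.toList none (some (-2)))   -- num[:-2]
  else if PySem.Str.endswith num "0" then
    String.ofList (PySem.List.slice num.toList none (some (-1)))   -- num[:-1]
  else num

-- ===== PRECONDITION & SPEC =====
def Spec_deleteZero (num : String) (out : String) : Prop := out = deleteZero_alt num
instance (num : String) (out : String) : Decidable (Spec_deleteZero num out) := by unfold Spec_deleteZero; infer_instance

-- ===== CLAIM (what is proved, stated in full; the proofs are below) =====
def Claim_equal_deleteZero : Prop := ∀ (num : String), Dom_deleteZero num → Spec_deleteZero num (deleteZero num)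

-- ===== LEMMAS AND PROOFS =====

-- A's loop computes the trailing-zero count capped at 3.
theorem deleteZeroLoop_eq (l : List Char) : ∀ cnt : Nat, cnt < 3 →
    deleteZeroLoop l cnt = min (cnt + (l.takeWhile (· == '0')).length) 3 := by
  induction l with
  | nil => intro cnt h; simp [deleteZeroLoop]; omega
  | cons ch rest ih =>
      intro cnt h
      by_cases hch : ch == '0'
      · simp only [deleteZeroLoop, hch, List.takeWhile_cons]
        by_cases h3 : cnt + 1 = 3
        · have : ((cnt + 1 : Nat) == 3) = true := by simp [h3]
          simp [h3]; omega
        · have hb : ((cnt + 1 : Nat) == 3) = false := by simp; omega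
          simp only [hb, if_true, if_false, Bool.false_eq_true]
          rw [ih (cnt + 1) (by omega)]
          simp
          omega
      · simp only [deleteZeroLoop, List.takeWhile_cons]
        rw [if_neg (by simpa using hch), if_neg (by simpa using hch)]
        simp; omega

-- replicate-prefix vs takeWhile length
theorem replicate_prefix_iff (r : List Char) (n : Nat) :
    (List.replicate n '0' <+: r) ↔ n ≤ (r.takeWhile (· == '0')).length := by
  induction n generalizing r with
  | zero => simp
  | succ n ih =>
      cases r with
      | nil => simp [List.replicate_succ]
      | cons c t =>
          simp only [List.replicate_succ, List.cons_prefix_cons, List.takeWhile_cons]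
          by_cases hc : c = '0'
          · simp [hc, ih t]
          · simp [Ne.symm hc, (by simpa using hc : (c == '0') = false)]

-- endswith k zeros ↔ k ≤ trailing-zero count
theorem endswith_zeros_iff (num : String) (n : Nat) :
    (List.replicate n '0' <:+ num.toList) ↔
      n ≤ (num.toList.reverse.takeWhile (· == '0')).length := by
  rw [← List.reverse_prefix, List.reverse_replicate, replicate_prefix_iff]

theorem endswith_eq_decide (num : String) (p : String) (n : Nat)
    (hp : p.toList = List.replicate n '0') :
    PySem.Str.endswith num p =
      decide (n ≤ (num.toList.reverse.takeWhile (· == '0')).length) := by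
  have hiff : PySem.Str.endswith num p = true ↔
      n ≤ (num.toList.reverse.takeWhile (· == '0')).length := by
    rw [PySem.Str.endswith_eq, PySem.Chars.endswith_iff, hp, endswith_zeros_iff]
  cases hb : PySem.Str.endswith num p
  · symm; rw [decide_eq_false_iff_not]
    intro hle
    rw [← hiff, hb] at hle
    cases hle
  · symm; rw [decide_eq_true_iff]
    exact hiff.mp hb

-- ===== VERDICT (by name: the statement is the Claim_ definition above) =====
theorem deleteZero_spec : Claim_equal_deleteZero := by
  intro num _
  have hcnt := deleteZeroLoop_eq num.toList.reverse 0 (by omega)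
  simp only [Nat.zero_add] at hcnt
  have htzlen : (num.toList.reverse.takeWhile (· == '0')).length ≤ num.toList.length := by
    have h := List.Sublist.length_le
      (List.takeWhile_sublist (l := num.toList.reverse) (p := (· == '0')))
    simpa using h
  unfold Spec_deleteZero deleteZero deleteZero_alt
  dsimp only
  rw [hcnt, PySem.List.slice_zero_start,
      endswith_eq_decide num "000" 3 (by decide),
      endswith_eq_decide num "00" 2 (by decide),
      endswith_eq_decide num "0" 1 (by decide)]
  set tz := (num.toList.reverse.takeWhile (· == '0')).length with htz
  by_cases h3 : 3 ≤ tz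
  · rw [if_pos (by simpa using h3), PySem.List.slice_to_neg_ofNat num.toList 3 (by omega)]
    have hm : min tz 3 = 3 := by omega
    rw [hm, show ((num.toList.length : Int) - ((3 : Nat) : Int))
          = ((num.toList.length - 3 : Nat) : Int) by omega,
        PySem.List.slice_to_natCast]
  · rw [if_neg (by simpa using h3)]
    by_cases h2 : 2 ≤ tz
    · rw [if_pos (by simpa using h2), PySem.List.slice_to_neg_ofNat num.toList 2 (by omega)]
      have hm : min tz 3 = 2 := by omega
      rw [hm, show ((num.toList.length : Int) - ((2 : Nat) : Int))
            = ((num.toList.length - 2 : Nat) : Int) by omega,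
          PySem.List.slice_to_natCast]
    · rw [if_neg (by simpa using h2)]
      by_cases h1 : 1 ≤ tz
      · rw [if_pos (by simpa using h1), PySem.List.slice_to_neg_one]
        have hm : min tz 3 = 1 := by omega
        rw [hm, show ((num.toList.length : Int) - ((1 : Nat) : Int))
              = ((num.toList.length - 1 : Nat) : Int) by omega,
            PySem.List.slice_to_natCast, List.dropLast_eq_take]
      · rw [if_neg (by simpa using h1)]
        have hm : min tz 3 = 0 := by omega
        rw [hm, show ((num.toList.length : Int) - ((0 : Nat) : Int))
              = ((num.toList.length : Nat) : Int) by omega,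
            PySem.List.slice_to_natCast, List.take_length]
        simp
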